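-- pv_equiv track=rewrite | github.com/FacundoOZ/University-of-Buenos-Aires | MSc-in-Computer-Science/Algoritmos 1/guías/8_Integradora_Python.py | acomodar
-- ===== SOURCE A (Python) =====
-- def acomodar(s: list[str]) -> list[str]:
--   res: list[str]      = []
--   lista_A: list[str]  = []
--   lista_B: list[str]  = []
--   for elem in s:
--     if elem == 'UP':                     # Agrego los elementos UP a lista_A,
--       lista_A.append(elem)
--     elif elem == 'DOWN':                 # y los DOWN a lista_B
--       lista_B.append(elem)
--   for elem in lista_A:                   # Agrego a res la lista_A completa,
--     res.append(elem)
--   for elem in lista_B:                   # y luego la lista_B completa.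
--     res.append(elem)
--   return res
-- ===== SOURCE B (Python) =====
-- def acomodar(s: list[str]) -> list[str]:
--   return ['UP'] * s.count('UP') + ['DOWN'] * s.count('DOWN')
-- ===== Notes on version B (the rewrite author's own statement) =====
-- stated objective: simpler
-- what changed: B keeps no lists at all: it counts the 'UP' and 'DOWN' occurrences and builds the result by replication, instead of A's partition into two lists followed by two element-copying loops.
import Mathlib
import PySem

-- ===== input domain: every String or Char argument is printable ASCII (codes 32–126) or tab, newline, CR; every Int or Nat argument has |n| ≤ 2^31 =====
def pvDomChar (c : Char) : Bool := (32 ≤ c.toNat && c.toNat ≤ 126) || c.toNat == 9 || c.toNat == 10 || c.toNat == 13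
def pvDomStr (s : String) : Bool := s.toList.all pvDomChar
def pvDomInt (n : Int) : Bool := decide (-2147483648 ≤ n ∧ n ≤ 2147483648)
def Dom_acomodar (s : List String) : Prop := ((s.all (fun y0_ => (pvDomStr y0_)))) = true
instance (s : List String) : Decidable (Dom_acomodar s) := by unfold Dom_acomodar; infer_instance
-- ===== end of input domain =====

-- B replaces A's partition-into-two-lists-then-copy by counting 'UP'/'DOWN' and replicating; simpler, same cost.


-- ===== PORT A =====
-- first loop: partition the elements into lista_A ('UP') and lista_B ('DOWN')
def acomodar (s : List String) : List String :=
  let ab := s.foldl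
    (fun (p : List String × List String) elem =>
      if elem = "UP" then (p.1 ++ [elem], p.2)
      else if elem = "DOWN" then (p.1, p.2 ++ [elem])
      else p)
    ([], [])
  -- second loop: append lista_A element by element to res
  let res := ab.1.foldl (fun r elem => r ++ [elem]) []
  -- third loop: append lista_B element by element to res
  let res := ab.2.foldl (fun r elem => r ++ [elem]) res
  res

-- ===== PORT B =====
def acomodar_alt (s : List String) : List String :=
  List.replicate (s.count "UP") "UP" ++ List.replicate (s.count "DOWN") "DOWN"

-- ===== PRECONDITION & SPEC =====
def Spec_acomodar (s : List String) (out : List String) : Prop := out = acomodar_alt s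
instance (s : List String) (out : List String) : Decidable (Spec_acomodar s out) := by unfold Spec_acomodar; infer_instance

-- ===== CLAIM (what is proved, stated in full; the proofs are below) =====
def Claim_equal_acomodar : Prop := ∀ (s : List String), Dom_acomodar s → Spec_acomodar s (acomodar s)

-- ===== LEMMAS AND PROOFS =====

theorem pv_foldl_app (l r0 : List String) :
    l.foldl (fun r elem => r ++ [elem]) r0 = r0 ++ l := by
  induction l generalizing r0 with
  | nil => simp
  | cons x xs ih => simp [List.foldl, ih]

theorem pv_cons_replicate {α : Type} (x : α) (n : ℕ) :
    x :: List.replicate n x = List.replicate n x ++ [x] :=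
  by induction n with
  | zero => simp
  | succ m ih => rw [List.replicate_succ]; exact congrArg (List.cons x) ih

theorem pv_partition_foldl (s : List String) (la lb : List String) :
    s.foldl
      (fun (p : List String × List String) elem =>
        if elem = "UP" then (p.1 ++ [elem], p.2)
        else if elem = "DOWN" then (p.1, p.2 ++ [elem])
        else p)
      (la, lb)
    = (la ++ List.replicate (s.count "UP") "UP",
       lb ++ List.replicate (s.count "DOWN") "DOWN") := by
  induction s generalizing la lb with
  | nil => simp
  | cons x xs ih =>
    by_cases hu : x = "UP"
    · subst hu
      simp [List.foldl, ih, pv_cons_replicate, List.replicate_succ']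
    · by_cases hd : x = "DOWN"
      · subst hd
        simp [List.foldl, ih, pv_cons_replicate, List.replicate_succ']
      · simp [List.foldl, hu, hd, ih]

-- ===== VERDICT (by name: the statement is the Claim_ definition above) =====
theorem acomodar_spec : Claim_equal_acomodar := by
  intro s _
  unfold Spec_acomodar acomodar acomodar_alt
  simp only [pv_partition_foldl s [] []]
  rw [pv_foldl_app, pv_foldl_app]
  simp
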